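-- pv_equiv track=rewrite | github.com/good-good-create/DroidPalette | code/find_colors_set.py | process_same_dict
-- ===== SOURCE A (Python) =====
-- def process_same_dict(component_with_issue):
--     color_list_pairs = {}
--     process_dict = {}
--
--     for key,value in component_with_issue.items():
--         color_list = value[0]
--         color_pairs = value[2]
--
--         if tuple(color_list) in color_list_pairs:
--             new_color_pairs = color_list_pairs[tuple(color_list)]
--             new_value = (value[0],value[1],new_color_pairs,value[3])
--             process_dict[key] = new_value
--         else:
--             color_list_pairs[tuple(color_list)] = color_pairs
--             process_dict[key] = value
--
--     return process_dict
-- ===== SOURCE B (Python) =====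
-- def process_same_dict(component_with_issue):
--     # first pass: record, per color list, the color_pairs of its first entry
--     first_pairs = {}
--     for value in component_with_issue.values():
--         first_pairs.setdefault(tuple(value[0]), value[2])
--     # second pass: rebuild every entry uniformly from the first-occurrence index
--     return {key: (value[0], value[1], first_pairs[tuple(value[0])], value[3])
--             for key, value in component_with_issue.items()}
-- ===== Notes on version B (the rewrite author's own statement) =====
-- stated objective: alternative
-- what changed: Replaces the single-pass loop with a branch and two growing dicts by two passes: a first pass builds a first-occurrence index color_list -> color_pairs via setdefault, then a dict comprehension rebuilds every entry uniformly from that index.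
import Mathlib
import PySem

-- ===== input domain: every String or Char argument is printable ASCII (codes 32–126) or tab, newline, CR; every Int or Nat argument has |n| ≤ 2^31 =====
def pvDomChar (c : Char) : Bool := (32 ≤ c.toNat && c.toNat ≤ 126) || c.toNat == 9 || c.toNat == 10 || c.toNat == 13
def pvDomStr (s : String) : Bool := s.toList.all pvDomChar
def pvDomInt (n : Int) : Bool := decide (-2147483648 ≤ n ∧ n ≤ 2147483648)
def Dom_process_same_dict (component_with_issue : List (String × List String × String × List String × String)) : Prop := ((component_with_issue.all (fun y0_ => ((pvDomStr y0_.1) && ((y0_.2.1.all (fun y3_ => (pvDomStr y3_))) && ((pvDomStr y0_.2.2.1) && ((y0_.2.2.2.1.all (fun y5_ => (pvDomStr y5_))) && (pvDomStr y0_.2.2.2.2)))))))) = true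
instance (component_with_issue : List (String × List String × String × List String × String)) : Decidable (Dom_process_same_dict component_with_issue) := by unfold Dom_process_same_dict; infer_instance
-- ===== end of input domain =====

-- B replaces A's single branching loop over two accumulator dicts by a first-occurrence
-- index pass plus a uniform rebuilding comprehension (alternative decomposition, same cost).

-- ===== PORT A =====
-- one loop step of A: state = (color_list_pairs, process_dict); the Python
-- 'if tuple(color_list) in color_list_pairs: … color_list_pairs[tuple(color_list)] …'
-- (membership test + lookup) is ported as one match on get?.
def pvStepA (st : PySem.Dict (List String) (List String) ×
              PySem.Dict String (List String × String × List String × String))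
    (kv : String × List String × String × List String × String) :
    PySem.Dict (List String) (List String) ×
      PySem.Dict String (List String × String × List String × String) :=
  match st.1.get? kv.2.1 with
  | some new_color_pairs =>
      (st.1, st.2.insert kv.1 (kv.2.1, kv.2.2.1, new_color_pairs, kv.2.2.2.2))
  | none =>
      (st.1.insert kv.2.1 kv.2.2.2.1, st.2.insert kv.1 kv.2)

def process_same_dict (component_with_issue : List (String × List String × String × List String × String)) : List (String × List String × String × List String × String) :=
  let items := (PySem.Dict.ofList component_with_issue).items
  ((items.foldl pvStepA (PySem.Dict.empty, PySem.Dict.empty)).2).items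

-- ===== PORT B =====
-- first pass of B: first_pairs.setdefault(tuple(value[0]), value[2]) over the items
def pvFirstFold (l : List (String × List String × String × List String × String))
    (f : PySem.Dict (List String) (List String)) :
    PySem.Dict (List String) (List String) :=
  l.foldl (fun f kv => f.setdefault kv.2.1 kv.2.2.2.1) f

def process_same_dict_alt (component_with_issue : List (String × List String × String × List String × String)) : List (String × List String × String × List String × String) :=
  let items := (PySem.Dict.ofList component_with_issue).items
  let first_pairs := pvFirstFold items PySem.Dict.empty
  -- first_pairs[tuple(value[0])] always hits (the first pass saw every color list);
  -- the KeyError-free lookup is ported as get? + getD.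
  items.map (fun kv => (kv.1, kv.2.1, kv.2.2.1, (first_pairs.get? kv.2.1).getD [], kv.2.2.2.2))

-- ===== PRECONDITION & SPEC =====
def Spec_process_same_dict (component_with_issue : List (String × List String × String × List String × String)) (out : List (String × List String × String × List String × String)) : Prop := out = process_same_dict_alt component_with_issue
instance (component_with_issue : List (String × List String × String × List String × String)) (out : List (String × List String × String × List String × String)) : Decidable (Spec_process_same_dict component_with_issue out) := by unfold Spec_process_same_dict; infer_instance

-- ===== CLAIM (what is proved, stated in full; the proofs are below) =====
def Claim_equal_process_same_dict : Prop := ∀ (component_with_issue : List (String × List String × String × List String × String)), Dom_process_same_dict component_with_issue → Spec_process_same_dict component_with_issue (process_same_dict component_with_issue)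

-- ===== LEMMAS AND PROOFS =====

-- setdefault never overwrites: an existing binding survives the whole first pass
theorem pvFirstFold_mono (l : List (String × List String × String × List String × String))
    (f : PySem.Dict (List String) (List String)) (k : List String) (v : List String)
    (h : f.get? k = some v) : (pvFirstFold l f).get? k = some v := by
  induction l generalizing f with
  | nil => exact h
  | cons kv rest ih =>
      apply ih
      by_cases hk : k = kv.2.1
      · subst hk
        rw [PySem.Dict.get?_setdefault_self, h]
        rfl
      · rw [PySem.Dict.get?_setdefault_of_ne _ _ hk, h]

-- invariant of A's loop: with fresh, distinct keys the process dict appends one rebuilt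
-- entry per item, and each entry's pairs equal the final first-occurrence index lookup
theorem pvMain (l : List (String × List String × String × List String × String))
    (clp : PySem.Dict (List String) (List String))
    (pd : PySem.Dict String (List String × String × List String × String))
    (hnd : (l.map Prod.fst).Nodup)
    (hfresh : ∀ kv ∈ l, pd.contains kv.1 = false) :
    ((l.foldl pvStepA (clp, pd)).2).items
      = pd.items ++ l.map (fun kv =>
          (kv.1, kv.2.1, kv.2.2.1, ((pvFirstFold l clp).get? kv.2.1).getD [], kv.2.2.2.2)) := by
  induction l generalizing clp pd with
  | nil => simp
  | cons kv rest ih =>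
      simp only [List.map_cons, List.nodup_cons, List.mem_map] at hnd
      obtain ⟨hhead, hrest⟩ := hnd
      have hkvfresh : pd.contains kv.1 = false := hfresh kv (List.mem_cons_self ..)
      have hpd' : ∀ (w : List String × String × List String × String) kv' (_ : kv' ∈ rest),
          (pd.insert kv.1 w).contains kv'.1 = false := by
        intro w kv' hmem
        rw [PySem.Dict.contains_insert]
        have h1 : (kv'.1 == kv.1) = false := by
          simp only [beq_eq_false_iff_ne, ne_eq]
          intro he; exact hhead ⟨kv', hmem, he⟩
        rw [h1, hfresh kv' (List.mem_cons_of_mem _ hmem), Bool.or_self]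
      simp only [List.foldl_cons]
      cases hget : clp.get? kv.2.1 with
      | some ncp =>
          have hcont : clp.contains kv.2.1 = true := by
            rw [PySem.Dict.contains_eq_isSome_get?, hget]; rfl
          have hff : pvFirstFold (kv :: rest) clp = pvFirstFold rest clp := by
            simp only [pvFirstFold, List.foldl_cons]
            rw [PySem.Dict.setdefault_of_contains _ _ hcont]
          simp only [pvStepA, hget]
          rw [ih clp (pd.insert kv.1 (kv.2.1, kv.2.2.1, ncp, kv.2.2.2.2)) hrest
            (hpd' _),
            PySem.Dict.items_insert_of_not_contains _ _ hkvfresh, hff, List.map_cons,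
            pvFirstFold_mono rest clp kv.2.1 ncp hget]
          simp
      | none =>
          have hcont : clp.contains kv.2.1 = false := by
            rw [PySem.Dict.contains_eq_isSome_get?, hget]; rfl
          have hff : pvFirstFold (kv :: rest) clp
              = pvFirstFold rest (clp.insert kv.2.1 kv.2.2.2.1) := by
            simp only [pvFirstFold, List.foldl_cons]
            rw [PySem.Dict.setdefault_of_not_contains _ _ hcont]
          simp only [pvStepA, hget]
          rw [ih (clp.insert kv.2.1 kv.2.2.2.1) (pd.insert kv.1 kv.2) hrest (hpd' _),
            PySem.Dict.items_insert_of_not_contains _ _ hkvfresh, hff, List.map_cons,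
            pvFirstFold_mono rest _ kv.2.1 kv.2.2.2.1
              (PySem.Dict.get?_insert_self _ _ _)]
          simp

-- ===== VERDICT (by name: the statement is the Claim_ definition above) =====
theorem process_same_dict_spec : Claim_equal_process_same_dict := by
  intro cwi _
  unfold Spec_process_same_dict process_same_dict process_same_dict_alt
  have hnd : (((PySem.Dict.ofList cwi).items.map Prod.fst)).Nodup :=
    PySem.Dict.nodup_keys_ofList cwi
  rw [pvMain _ PySem.Dict.empty PySem.Dict.empty hnd
    (fun kv _ => PySem.Dict.contains_empty _)]
  rfl
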